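-- pv_equiv track=rewrite | github.com/rodrigo-castellon/euler-problems | Euler46/Euler46.py | is_written
-- ===== SOURCE A (Python) =====
-- def gen_primes(n):
-- 	prime_list = []
-- 	num = 2
-- 	while num < n:
-- 		is_prime = True
-- 		for index, prime in enumerate(prime_list):
-- 			if num % prime == 0:
-- 				is_prime = False
-- 				break
-- 		if is_prime == True:
-- 			prime_list.append(num)
-- 		num += 1
-- 	return prime_list
--
-- def is_written(n):
-- 	primes = gen_primes(n)
-- 	for index, prime in enumerate(primes):
-- 		square_num = 1
-- 		while square_num*square_num < n:
-- 			if prime + 2*square_num*square_num == n: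
-- 				return True
-- 			square_num += 1
-- 	return False
-- ===== SOURCE B (Python) =====
-- def _is_prime(m):
--     if m < 2:
--         return False
--     d = 2
--     while d * d <= m:
--         if m % d == 0:
--             return False
--         d += 1
--     return True
--
-- def is_written(n):
--     k = 1
--     while 2 * k * k <= n - 2:
--         if _is_prime(n - 2 * k * k):
--             return True
--         k += 1
--     return False
-- ===== Notes on version B (the rewrite author's own statement) =====
-- stated objective: faster
-- what changed: B drops A's full prime list (every integer below n trial-divided against all earlier primes) and instead iterates over the squares alone, testing each remaining candidate n minus twice a square for primality directly by trial division up to its square root.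
import Mathlib
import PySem

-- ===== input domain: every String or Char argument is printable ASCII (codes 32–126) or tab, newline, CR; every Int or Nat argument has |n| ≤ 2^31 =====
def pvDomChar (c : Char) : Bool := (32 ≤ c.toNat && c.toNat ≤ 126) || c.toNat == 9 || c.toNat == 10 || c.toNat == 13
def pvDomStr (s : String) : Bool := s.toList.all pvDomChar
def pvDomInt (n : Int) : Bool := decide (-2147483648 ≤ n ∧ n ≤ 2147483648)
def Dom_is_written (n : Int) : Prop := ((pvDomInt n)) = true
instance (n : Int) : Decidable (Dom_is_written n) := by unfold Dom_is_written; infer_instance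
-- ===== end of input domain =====

-- B replaces A's full prime list (trial division of every number below n) by a single loop
-- over squares testing primality of n - 2*k*k directly; objective: faster (asymptotic).

-- ===== PORT A =====
-- while num < n loop of gen_primes; fuel = (n-2).toNat counts the iterations
def genPrimesAux : Nat → Int → List Int → List Int
  | 0, _, acc => acc
  | fuel+1, num, acc =>
    -- 'for prime in prime_list: if num % prime == 0: is_prime = False; break'
    let isPrime := !(acc.any (fun p => PySem.Int.mod num p == 0))
    genPrimesAux fuel (num + 1) (if isPrime then acc ++ [num] else acc)

def gen_primes (n : Int) : List Int := genPrimesAux (n - 2).toNat 2 []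

-- inner 'while square_num*square_num < n' loop; fuel is a totality device only
def innerAux : Nat → Int → Int → Int → Bool
  | 0, _, _, _ => false
  | fuel+1, p, n, k =>
    if k * k < n then
      if p + 2 * k * k == n then true else innerAux fuel p n (k + 1)
    else false

def is_written (n : Int) : Bool :=
  (gen_primes n).any (fun p => innerAux n.toNat p n 1)

-- ===== PORT B =====
-- trial-division loop of _is_prime; fuel is a totality device only
def isPrimeAux : Nat → Int → Int → Bool
  | 0, _, _ => true
  | fuel+1, m, d =>
    if d * d ≤ m then
      if PySem.Int.mod m d == 0 then false else isPrimeAux fuel m (d + 1)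
    else true

def isPrimeB (m : Int) : Bool := if m < 2 then false else isPrimeAux m.toNat m 2

-- outer 'while 2*k*k <= n - 2' loop of B
def altAux : Nat → Int → Int → Bool
  | 0, _, _ => false
  | fuel+1, n, k =>
    if 2 * k * k ≤ n - 2 then
      if isPrimeB (n - 2 * k * k) then true else altAux fuel n (k + 1)
    else false

def is_written_alt (n : Int) : Bool := altAux n.toNat n 1

-- ===== PRECONDITION & SPEC =====
def Spec_is_written (n : Int) (out : Bool) : Prop := out = is_written_alt n
instance (n : Int) (out : Bool) : Decidable (Spec_is_written n out) := by unfold Spec_is_written; infer_instance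

-- ===== CLAIM (what is proved, stated in full; the proofs are below) =====
def Claim_equal_is_written : Prop := ∀ (n : Int), Dom_is_written n → Spec_is_written n (is_written n)

-- ===== LEMMAS AND PROOFS =====

-- primality over Int, the common specification of both programs' prime tests
def GoodPrime (p : Int) : Prop := 2 ≤ p ∧ ∀ d : Int, 2 ≤ d → d < p → ¬ d ∣ p

theorem goodPrime_iff_natPrime (p : Int) (hp : 2 ≤ p) :
    GoodPrime p ↔ Nat.Prime p.toNat := by
  have hpc : ((p.toNat : Int)) = p := Int.toNat_of_nonneg (by omega)
  constructor
  · rintro ⟨h2, hnd⟩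
    rw [Nat.prime_def_lt]
    refine ⟨by omega, ?_⟩
    intro m hm hdvd
    by_contra hne
    have hm0 : m ≠ 0 := by
      rintro rfl
      have := Nat.eq_zero_of_zero_dvd hdvd
      omega
    have h2m : 2 ≤ m := by omega
    refine hnd (m : Int) (by exact_mod_cast h2m) (by omega) ?_
    rw [← hpc]
    exact_mod_cast hdvd
  · intro hprime
    refine ⟨hp, ?_⟩
    intro d hd hdp hdvd
    have hdvd' : d.toNat ∣ p.toNat := by
      have hdc : ((d.toNat : Int)) = d := Int.toNat_of_nonneg (by omega)
      rw [← hdc, ← hpc] at hdvd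
      exact_mod_cast hdvd
    rcases (Nat.Prime.eq_one_or_self_of_dvd hprime _ hdvd') with h | h <;> omega

-- F1: a non-prime ≥ 2 has a prime divisor strictly below it
theorem exists_prime_divisor (m : Int) (h2 : 2 ≤ m) (h : ¬ GoodPrime m) :
    ∃ q : Int, GoodPrime q ∧ q < m ∧ q ∣ m := by
  have hnp : ¬ Nat.Prime m.toNat := fun hp => h ((goodPrime_iff_natPrime m h2).mpr hp)
  obtain ⟨q, hq, hqd⟩ := Nat.exists_prime_and_dvd (n := m.toNat) (by omega)
  have hqle : q ≤ m.toNat := Nat.le_of_dvd (by omega) hqd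
  have hqne : q ≠ m.toNat := fun he => hnp (he ▸ hq)
  have hq2 : 2 ≤ (q : Int) := by exact_mod_cast hq.two_le
  refine ⟨(q : Int), (goodPrime_iff_natPrime _ hq2).mpr (by simpa using hq), by omega, ?_⟩
  have hmc : ((m.toNat : Int)) = m := Int.toNat_of_nonneg (by omega)
  rw [← hmc]
  exact_mod_cast hqd

-- F2: a non-prime ≥ 2 has a divisor e with 2 ≤ e and e*e ≤ m
theorem exists_small_divisor (m : Int) (h2 : 2 ≤ m) (h : ¬ GoodPrime m) :
    ∃ e : Int, 2 ≤ e ∧ e * e ≤ m ∧ e ∣ m := by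
  have : ∃ d : Int, 2 ≤ d ∧ d < m ∧ d ∣ m := by
    by_contra hc
    push Not at hc
    exact h ⟨h2, fun d h1 h2' h3 => (hc d h1 h2') h3⟩
  obtain ⟨d, hd2, hdm, hdvd⟩ := this
  obtain ⟨c, hc⟩ := hdvd
  have hd0 : 0 < d := by omega
  have hc2 : 2 ≤ c := by nlinarith
  rcases le_total d c with hle | hle
  · exact ⟨d, hd2, by nlinarith, ⟨c, hc⟩⟩
  · exact ⟨c, hc2, by nlinarith, ⟨d, by linarith [hc]; ⟩⟩

theorem genPrimesAux_mem (fuel : Nat) (num : Int) (acc : List Int) (h2 : 2 ≤ num)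
    (hacc : ∀ p, p ∈ acc ↔ (p < num ∧ GoodPrime p)) :
    ∀ p, p ∈ genPrimesAux fuel num acc ↔ (p < num + fuel ∧ GoodPrime p) := by
  induction fuel generalizing num acc with
  | zero =>
    intro p
    simpa only [genPrimesAux, Nat.cast_zero, add_zero] using hacc p
  | succ fuel ih =>
    intro p
    have hany : (acc.any fun q => PySem.Int.mod num q == 0) = true ↔ ¬ GoodPrime num := by
      constructor
      · intro hA hG
        rw [List.any_eq_true] at hA
        obtain ⟨q, hqmem, hq0⟩ := hA
        have hq0' : q ∣ num := (PySem.Int.mod_eq_zero_iff_dvd num q).mp (by simpa using hq0)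
        obtain ⟨hqlt, hGq⟩ := (hacc q).mp hqmem
        exact hG.2 q hGq.1 hqlt hq0'
      · intro hG
        obtain ⟨q, hGq, hqlt, hqdvd⟩ := exists_prime_divisor num h2 hG
        rw [List.any_eq_true]
        exact ⟨q, (hacc q).mpr ⟨hqlt, hGq⟩,
          by simpa using (PySem.Int.mod_eq_zero_iff_dvd num q).mpr hqdvd⟩
    rw [show genPrimesAux (fuel+1) num acc
        = genPrimesAux fuel (num+1)
            (if !(acc.any fun q => PySem.Int.mod num q == 0) then acc ++ [num] else acc) from rfl]
    by_cases hb : (acc.any fun q => PySem.Int.mod num q == 0) = false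
    · have hg : GoodPrime num := by
        by_contra hg
        rw [hany.mpr hg] at hb
        cases hb
      have hacc' : ∀ q, q ∈ acc ++ [num] ↔ (q < num + 1 ∧ GoodPrime q) := by
        intro q
        simp only [List.mem_append, List.mem_singleton, hacc q]
        constructor
        · rintro (⟨h1, hG⟩ | rfl)
          · exact ⟨by omega, hG⟩
          · exact ⟨by omega, hg⟩
        · rintro ⟨h1, hG⟩
          by_cases hq : q = num
          · exact Or.inr hq
          · exact Or.inl ⟨by omega, hG⟩
      have hcond : (if !(acc.any fun q => PySem.Int.mod num q == 0) then acc ++ [num] else acc)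
          = acc ++ [num] := by rw [hb]; rfl
      rw [hcond, ih (num+1) (acc ++ [num]) (by omega) hacc']
      constructor <;> rintro ⟨h1, hG⟩ <;> exact ⟨by push_cast at *; omega, hG⟩
    · rw [Bool.not_eq_false] at hb
      have hg : ¬ GoodPrime num := hany.mp hb
      have hacc' : ∀ q, q ∈ acc ↔ (q < num + 1 ∧ GoodPrime q) := by
        intro q
        rw [hacc q]
        constructor
        · rintro ⟨h1, hG⟩; exact ⟨by omega, hG⟩
        · rintro ⟨h1, hG⟩
          refine ⟨?_, hG⟩
          rcases lt_or_eq_of_le (by omega : q ≤ num) with h | h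
          · exact h
          · exact absurd (h ▸ hG) hg
      have hcond : (if !(acc.any fun q => PySem.Int.mod num q == 0) then acc ++ [num] else acc)
          = acc := by rw [hb]; rfl
      rw [hcond, ih (num+1) acc (by omega) hacc']
      constructor <;> rintro ⟨h1, hG⟩ <;> exact ⟨by push_cast at *; omega, hG⟩

theorem gen_primes_mem (n q : Int) : q ∈ gen_primes n ↔ (q < n ∧ GoodPrime q) := by
  unfold gen_primes
  rw [genPrimesAux_mem (n-2).toNat 2 [] (by omega)
    (by intro q; simp only [List.not_mem_nil, false_iff]; rintro ⟨h1, h2, _⟩; omega) q]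
  constructor <;> rintro ⟨h1, hG⟩ <;> exact ⟨by have := hG.1; omega, hG⟩

theorem innerAux_iff (fuel : Nat) (p n k : Int) (hk : 1 ≤ k) :
    innerAux fuel p n k = true ↔
      ∃ j : Int, k ≤ j ∧ j < k + fuel ∧ j * j < n ∧ p + 2 * j * j = n := by
  induction fuel generalizing k with
  | zero =>
    simp only [innerAux, Nat.cast_zero, add_zero]
    constructor
    · intro h; simp at h
    · rintro ⟨j, h1, h2, _, _⟩; exfalso; omega
  | succ fuel ih =>
    simp only [innerAux]
    split_ifs with hlt heq
    · simp only [beq_iff_eq] at heq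
      simp only [true_iff]
      exact ⟨k, le_refl k, by push_cast; omega, hlt, heq⟩
    · simp only [beq_iff_eq] at heq
      rw [ih (k+1) (by omega)]
      constructor
      · rintro ⟨j, h1, h2, h3, h4⟩
        exact ⟨j, by omega, by push_cast at *; omega, h3, h4⟩
      · rintro ⟨j, h1, h2, h3, h4⟩
        rcases lt_or_eq_of_le h1 with h | h
        · exact ⟨j, by omega, by push_cast at *; omega, h3, h4⟩
        · exact absurd (h ▸ h4) heq
    · constructor
      · intro h; simp at h
      · rintro ⟨j, h1, _, h3, _⟩
        have : k * k ≤ j * j := by nlinarith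
        exfalso; omega

theorem A_iff (n : Int) :
    is_written n = true ↔
      ∃ p : Int, (p < n ∧ GoodPrime p) ∧ ∃ j : Int, 1 ≤ j ∧ j * j < n ∧ p + 2 * j * j = n := by
  unfold is_written
  rw [List.any_eq_true]
  constructor
  · rintro ⟨p, hpmem, hinner⟩
    obtain ⟨j, h1, h2, h3, h4⟩ := (innerAux_iff n.toNat p n 1 (le_refl 1)).mp hinner
    exact ⟨p, (gen_primes_mem n p).mp hpmem, j, h1, h3, h4⟩
  · rintro ⟨p, hp, j, h1, h3, h4⟩
    refine ⟨p, (gen_primes_mem n p).mpr hp, (innerAux_iff n.toNat p n 1 (le_refl 1)).mpr ?_⟩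
    have hjj : 1 ≤ j * j := by nlinarith
    have hjle : j ≤ j * j := by nlinarith
    exact ⟨j, h1, by omega, h3, h4⟩

theorem isPrimeAux_iff (fuel : Nat) (m d : Int) (hd : 2 ≤ d) :
    isPrimeAux fuel m d = true ↔
      ∀ e : Int, d ≤ e → e < d + fuel → e * e ≤ m → ¬ e ∣ m := by
  induction fuel generalizing d with
  | zero =>
    simp only [isPrimeAux, Nat.cast_zero, add_zero, true_iff]
    intro e h1 h2
    exfalso; omega
  | succ fuel ih =>
    simp only [isPrimeAux]
    split_ifs with hle hmod
    · simp only [beq_iff_eq] at hmod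
      have hdvd : d ∣ m := (PySem.Int.mod_eq_zero_iff_dvd m d).mp hmod
      constructor
      · intro h; simp at h
      · intro hAll
        exact absurd hdvd (hAll d (le_refl d) (by push_cast; omega) hle)
    · simp only [beq_iff_eq] at hmod
      have hnd : ¬ d ∣ m := fun h => hmod ((PySem.Int.mod_eq_zero_iff_dvd m d).mpr h)
      rw [ih (d+1) (by omega)]
      constructor
      · intro hAll e h1 h2 h3
        rcases lt_or_eq_of_le h1 with h | h
        · exact hAll e (by omega) (by push_cast at *; omega) h3
        · exact h ▸ hnd
      · intro hAll e h1 h2 h3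
        exact hAll e (by omega) (by push_cast at *; omega) h3
    · simp only [true_iff]
      intro e h1 h2 h3
      have : d * d ≤ e * e := by nlinarith
      exfalso; omega

theorem isPrimeB_iff (m : Int) : isPrimeB m = true ↔ GoodPrime m := by
  unfold isPrimeB
  split_ifs with hm
  · constructor
    · intro h; simp at h
    · rintro ⟨h2, _⟩; exfalso; omega
  · push Not at hm
    rw [isPrimeAux_iff m.toNat m 2 (le_refl 2)]
    constructor
    · intro hAll
      by_contra hG
      obtain ⟨e, he2, hee, hedvd⟩ := exists_small_divisor m hm hG
      have h2e : 2 * e ≤ e * e := by nlinarith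
      exact absurd hedvd (hAll e he2 (by omega) hee)
    · rintro ⟨h2, hnd⟩ e h1 h2' h3
      have h2e : 2 * e ≤ e * e := by nlinarith
      exact hnd e h1 (by omega) 

theorem altAux_iff (fuel : Nat) (n k : Int) (hk : 1 ≤ k) :
    altAux fuel n k = true ↔
      ∃ j : Int, k ≤ j ∧ j < k + fuel ∧ 2 * j * j ≤ n - 2 ∧ isPrimeB (n - 2 * j * j) = true := by
  induction fuel generalizing k with
  | zero =>
    simp only [altAux, Nat.cast_zero, add_zero]
    constructor
    · intro h; simp at h
    · rintro ⟨j, h1, h2, _, _⟩; exfalso; omega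
  | succ fuel ih =>
    simp only [altAux]
    split_ifs with hle hp
    · simp only [true_iff]
      exact ⟨k, le_refl k, by push_cast; omega, hle, hp⟩
    · rw [ih (k+1) (by omega)]
      constructor
      · rintro ⟨j, h1, h2, h3, h4⟩
        exact ⟨j, by omega, by push_cast at *; omega, h3, h4⟩
      · rintro ⟨j, h1, h2, h3, h4⟩
        rcases lt_or_eq_of_le h1 with h | h
        · exact ⟨j, by omega, by push_cast at *; omega, h3, h4⟩
        · exact absurd (h ▸ h4) hp
    · constructor
      · intro h; simp at h
      · rintro ⟨j, h1, h2, h3, _⟩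
        have : 2 * k * k ≤ 2 * j * j := by nlinarith
        exfalso; omega

theorem B_iff (n : Int) :
    is_written_alt n = true ↔
      ∃ j : Int, 1 ≤ j ∧ 2 * j * j ≤ n - 2 ∧ GoodPrime (n - 2 * j * j) := by
  unfold is_written_alt
  rw [altAux_iff n.toNat n 1 (le_refl 1)]
  constructor
  · rintro ⟨j, h1, h2, h3, h4⟩
    exact ⟨j, h1, h3, (isPrimeB_iff _).mp h4⟩
  · rintro ⟨j, h1, h3, h4⟩
    have hjj : 1 ≤ j * j := by nlinarith
    have hjle : j ≤ j * j := by nlinarith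
    have h2j : 2 * j * j = 2 * (j * j) := by ring
    exact ⟨j, h1, by omega, h3, (isPrimeB_iff _).mpr h4⟩

-- ===== VERDICT (by name: the statement is the Claim_ definition above) =====
theorem is_written_spec : Claim_equal_is_written := by
  intro n _
  unfold Spec_is_written
  have key : is_written n = true ↔ is_written_alt n = true := by
    rw [A_iff, B_iff]
    constructor
    · rintro ⟨p, ⟨hpn, hp⟩, j, hj1, hjn, heq⟩
      refine ⟨j, hj1, by have := hp.1; omega, ?_⟩
      have hpe : n - 2 * j * j = p := by omega
      rw [hpe]; exact hp
    · rintro ⟨j, hj1, hjn, hp⟩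
      exact ⟨n - 2 * j * j, ⟨by nlinarith, hp⟩, j, hj1, by nlinarith, by ring⟩
  rcases hb : is_written_alt n with _ | _ <;> rcases ha : is_written n with _ | _ <;> simp_all
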